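-- pv_equiv track=rewrite | github.com/ZonaWei/Master-Thesis | typology_morphology/fusion_ratio.py | greedy_prefix_count
-- ===== SOURCE A (Python) =====
-- def greedy_prefix_count(word, pref_list):
--     """
--     Return (count, matched_any) where count is the number of prefixes stripped
--     using a greedy, longest-first, iterative scan. Lowercases the word.
--     """
--     w = str(word).lower()
--     # unique prefixes, longest-first to avoid partial shadowing
--     prefs = sorted(set(pref_list), key=len, reverse=True)
--     count = 0
--     matched_any = False
--     while True:
--         matched = False
--         for p in prefs:
--             if w.startswith(p):
--                 w = w[len(p):]
--                 count += 1
--                 matched = True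
--                 matched_any = True
--                 break  # restart from the longest prefix again
--         if not matched:
--             break
--     return count, matched_any
-- ===== SOURCE B (Python) =====
-- def greedy_prefix_count(word, pref_list):
--     """
--     Same result as the original: repeatedly strip the longest matching prefix
--     from the lowercased word, counting strips.  Instead of scanning the whole
--     sorted prefix list at every step, keep the prefixes in a hash set and, at
--     the current position, probe candidate lengths from the longest downward
--     with O(1) set lookups; advance an index instead of re-slicing the word.
--     """
--     w = str(word).lower()
--     prefs = set(pref_list)
--     maxlen = max((len(p) for p in prefs), default=0)
--     n = len(w)
--     count = 0
--     matched_any = False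
--     i = 0
--     while True:
--         L = min(maxlen, n - i)
--         while L > 0 and w[i:i + L] not in prefs:
--             L -= 1
--         if L == 0:
--             break
--         i += L
--         count += 1
--         matched_any = True
--     return count, matched_any
-- ===== Notes on version B (the rewrite author's own statement) =====
-- stated objective: faster
-- what changed: Replaces A's per-step scan of the whole length-sorted prefix list (each startswith rebuilding/re-slicing the word) with a hash set of prefixes probed at candidate lengths longest-first while advancing an index into the word, so the prefix list is traversed only once to build the set.
-- outside the precondition, e.g. on greedy_prefix_count('aba', ['a', '']): A does not finish within the time limit, B returns (1, True)
import Mathlib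
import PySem

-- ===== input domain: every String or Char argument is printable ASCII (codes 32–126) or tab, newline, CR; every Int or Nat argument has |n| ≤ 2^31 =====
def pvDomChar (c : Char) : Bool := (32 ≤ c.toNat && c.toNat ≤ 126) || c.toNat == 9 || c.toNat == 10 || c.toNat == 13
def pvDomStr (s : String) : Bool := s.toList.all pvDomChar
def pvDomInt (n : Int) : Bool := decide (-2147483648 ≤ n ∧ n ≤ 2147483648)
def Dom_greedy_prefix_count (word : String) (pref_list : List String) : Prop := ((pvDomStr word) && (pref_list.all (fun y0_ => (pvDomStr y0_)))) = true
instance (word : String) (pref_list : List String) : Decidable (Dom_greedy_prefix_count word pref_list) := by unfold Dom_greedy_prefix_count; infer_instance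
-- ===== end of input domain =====

-- B replaces A's repeated scan of the length-sorted prefix list with a hash-set
-- probed at candidate lengths longest-first, advancing an index instead of re-slicing.

-- ===== PORT A =====
-- the inner 'for p in prefs: if w.startswith(p): … break' loop: first match, or none
def pvAFind (prefs : List String) (w : String) : Option String :=
  match prefs with
  | [] => none
  | p :: rest =>
      if PySem.Str.startswith w p then some (PySem.Str.slice w (some (PySem.Str.len p)) none)
      else pvAFind rest w

-- the 'while True' loop; fuel = len(w)+1 is a totality guard only: each matched
-- prefix is nonempty under Pre_, so w shrinks every iteration and fuel suffices
def pvALoop (prefs : List String) : Nat → String → Int → Bool → Int × Bool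
  | 0, _, count, matched_any => (count, matched_any)
  | fuel + 1, w, count, matched_any =>
      match pvAFind prefs w with
      | some w' => pvALoop prefs fuel w' (count + 1) true
      | none => (count, matched_any)

def greedy_prefix_count (word : String) (pref_list : List String) : Int × Bool :=
  let w := PySem.Str.lower word
  let prefs := PySem.List.sorted (PySem.Set.ofList pref_list) (fun p => PySem.Str.len p) true
  pvALoop prefs (w.toList.length + 1) w 0 false

-- ===== PORT B =====
-- the inner 'while L > 0 and w[i:i+L] not in prefs: L -= 1' loop; returns the final L
def pvBFind (prefs : PySem.Set String) (w : String) (i : Nat) : Nat → Nat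
  | 0 => 0
  | L + 1 =>
      if PySem.Set.contains prefs (PySem.Str.slice w (some (i : Int)) (some ((i : Int) + (L + 1 : Nat)))) then L + 1
      else pvBFind prefs w i L

-- the outer 'while True' loop over the position i; fuel = n+1 is a totality guard
def pvBLoop (prefs : PySem.Set String) (w : String) (n maxlen : Nat) :
    Nat → Nat → Int → Bool → Int × Bool
  | 0, _, count, matched_any => (count, matched_any)
  | fuel + 1, i, count, matched_any =>
      let L := pvBFind prefs w i (min maxlen (n - i))
      if L = 0 then (count, matched_any)
      else pvBLoop prefs w n maxlen fuel (i + L) (count + 1) true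

def greedy_prefix_count_alt (word : String) (pref_list : List String) : Int × Bool :=
  let w := PySem.Str.lower word
  let prefs : PySem.Set String := PySem.Set.ofList pref_list
  -- max((len(p) for p in prefs), default=0): a running max over the set (order-independent)
  let maxlen := prefs.foldl (fun acc p => max acc p.toList.length) 0
  let n := w.toList.length
  pvBLoop prefs w n maxlen (n + 1) 0 0 false

-- ===== PRECONDITION & SPEC =====
-- Pre_ excludes an empty-string prefix, on which A's while-loop never terminates
-- (''.startswith matches forever); B simply stops when no nonempty prefix matches.
def Pre_greedy_prefix_count (word : String) (pref_list : List String) : Prop :=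
  "" ∉ pref_list
instance (word : String) (pref_list : List String) : Decidable (Pre_greedy_prefix_count word pref_list) := by unfold Pre_greedy_prefix_count; infer_instance

def pvWitness_greedy_prefix_count : String × List String := ("Unready", ["un", "read", "re"])

def Spec_greedy_prefix_count (word : String) (pref_list : List String) (out : Int × Bool) : Prop := out = greedy_prefix_count_alt word pref_list
instance (word : String) (pref_list : List String) (out : Int × Bool) : Decidable (Spec_greedy_prefix_count word pref_list out) := by unfold Spec_greedy_prefix_count; infer_instance

-- ===== CLAIM (what is proved, stated in full; the proofs are below) =====
def Claim_equal_greedy_prefix_count : Prop := ∀ (word : String) (pref_list : List String), Dom_greedy_prefix_count word pref_list → Pre_greedy_prefix_count word pref_list → Spec_greedy_prefix_count word pref_list (greedy_prefix_count word pref_list)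

-- ===== LEMMAS AND PROOFS =====

-- maxlen bounds every prefix length
lemma pv_maxlen_ge (P : List String) (p : String) (hp : p ∈ P) :
    p.toList.length ≤ P.foldl (fun acc q => max acc q.toList.length) 0 :=
  (PySem.List.le_foldl_max_nat P (fun q => q.toList.length) 0).2 p hp

-- characterisation of A's inner loop on a length-nonincreasing list:
-- either nothing matches, or the FIRST match has maximal length among all matches
lemma pvAFind_spec (S : List String) (w : String)
    (hs : S.Pairwise (fun a b => PySem.Str.len b ≤ PySem.Str.len a)) :
    (pvAFind S w = none ∧ ∀ p ∈ S, PySem.Str.startswith w p = false) ∨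
    (∃ p ∈ S, PySem.Str.startswith w p = true ∧
      pvAFind S w = some (PySem.Str.slice w (some (PySem.Str.len p)) none) ∧
      ∀ q ∈ S, PySem.Str.startswith w q = true → PySem.Str.len q ≤ PySem.Str.len p) := by
  induction S with
  | nil => exact Or.inl ⟨rfl, by simp⟩
  | cons p rest ih =>
    rcases List.pairwise_cons.mp hs with ⟨hle, hrest⟩
    by_cases hm : PySem.Str.startswith w p = true
    · refine Or.inr ⟨p, by simp, hm, by simp only [pvAFind]; rw [if_pos hm], ?_⟩
      intro q hq _
      rcases List.mem_cons.mp hq with rfl | hq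
      · exact le_refl _
      · exact hle q hq
    · have hfind : pvAFind (p :: rest) w = pvAFind rest w := by
        simp only [pvAFind]; rw [if_neg hm]
      rcases ih hrest with ⟨h1, h2⟩ | ⟨q, hq, hqm, hqf, hmax⟩
      · refine Or.inl ⟨by rw [hfind, h1], ?_⟩
        intro r hr
        rcases List.mem_cons.mp hr with rfl | hr
        · exact Bool.eq_false_iff.mpr hm
        · exact h2 r hr
      · refine Or.inr ⟨q, List.mem_cons_of_mem _ hq, hqm, by rw [hfind]; exact hqf, ?_⟩
        intro r hr hrm
        rcases List.mem_cons.mp hr with rfl | hr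
        · exact absurd hrm hm
        · exact hmax r hr hrm

-- characterisation of B's inner loop
lemma pvBFind_spec (P : PySem.Set String) (w : String) (i L : Nat) :
    (pvBFind P w i L = 0 ∧ ∀ L', 1 ≤ L' → L' ≤ L →
        PySem.Set.contains P (PySem.Str.slice w (some (i : Int)) (some ((i : Int) + (L' : Nat)))) = false) ∨
    (1 ≤ pvBFind P w i L ∧ pvBFind P w i L ≤ L ∧
      PySem.Set.contains P (PySem.Str.slice w (some (i : Int)) (some ((i : Int) + (pvBFind P w i L : Nat)))) = true ∧
      ∀ L', pvBFind P w i L < L' → L' ≤ L →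
        PySem.Set.contains P (PySem.Str.slice w (some (i : Int)) (some ((i : Int) + (L' : Nat)))) = false) := by
  induction L with
  | zero => exact Or.inl ⟨rfl, by omega⟩
  | succ L ih =>
    by_cases h : PySem.Set.contains P (PySem.Str.slice w (some (i : Int)) (some ((i : Int) + (L + 1 : Nat)))) = true
    · right
      have he : pvBFind P w i (L + 1) = L + 1 := by
        simp only [pvBFind]
        rw [if_pos (by exact_mod_cast h)]
      rw [he]
      exact ⟨by omega, le_refl _, h, by omega⟩
    · have he : pvBFind P w i (L + 1) = pvBFind P w i L := by
        simp only [pvBFind]; rw [if_neg (by exact_mod_cast h)]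
      rw [he]
      rcases ih with ⟨h1, h2⟩ | ⟨h1, h2, h3, h4⟩
      · left
        refine ⟨h1, ?_⟩
        intro L' hL1 hL2
        rcases Nat.lt_or_ge L' (L + 1) with hlt | hge
        · exact h2 L' hL1 (by omega)
        · have : L' = L + 1 := by omega
          subst this
          exact_mod_cast Bool.eq_false_iff.mpr h
      · right
        refine ⟨h1, by omega, h3, ?_⟩
        intro L' hL1 hL2
        rcases Nat.lt_or_ge L' (L + 1) with hlt | hge
        · exact h4 L' hL1 (by omega)
        · have : L' = L + 1 := by omega
          subst this
          exact_mod_cast Bool.eq_false_iff.mpr h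

-- startswith as a take-equality on the char lists
lemma pv_startswith_iff (w p : String) :
    PySem.Str.startswith w p = true ↔ p.toList = w.toList.take p.toList.length := by
  rw [PySem.Str.startswith_eq, PySem.Chars.startswith_iff, List.prefix_iff_eq_take]

-- toList of B's slice probe
lemma pv_slice_toList (w : String) (i L : Nat) :
    (PySem.Str.slice w (some (i : Int)) (some ((i : Int) + (L : Nat)))).toList
      = (w.toList.drop i).take L := by
  simp [PySem.List.slice_natCast_add]

-- the step lemma: at position i of the full word, A's scan and B's probe agree
lemma pv_step (S : List String) (P : PySem.Set String)
    (hmem : ∀ p, p ∈ S ↔ p ∈ P)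
    (hs : S.Pairwise (fun a b => PySem.Str.len b ≤ PySem.Str.len a))
    (hne : ∀ p ∈ P, p.toList ≠ [])
    (full w : String) (i maxlen : Nat)
    (hmax : ∀ p ∈ P, p.toList.length ≤ maxlen)
    (hi : i ≤ full.toList.length)
    (hw : w.toList = full.toList.drop i) :
    (pvBFind P full i (min maxlen (full.toList.length - i)) = 0 ∧ pvAFind S w = none) ∨
    (∃ L, pvBFind P full i (min maxlen (full.toList.length - i)) = L ∧ 1 ≤ L ∧
      L ≤ full.toList.length - i ∧
      ∃ w', pvAFind S w = some w' ∧ w'.toList = full.toList.drop (i + L)) := by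
  set n := full.toList.length with hn
  set L0 := min maxlen (n - i) with hL0
  have hwlen : w.toList.length = n - i := by rw [hw, List.length_drop]
  -- a prefix p ∈ P that matches w corresponds to B's probe at its length
  have hcorr : ∀ p ∈ P, PySem.Str.startswith w p = true →
      PySem.Str.slice full (some (i : Int)) (some ((i : Int) + (p.toList.length : Nat))) = p := by
    intro p _ hm
    apply String.toList_inj.mp
    rw [pv_slice_toList, ← hw]
    exact ((pv_startswith_iff w p).mp hm).symm
  have hlen_le : ∀ p ∈ P, PySem.Str.startswith w p = true → 1 ≤ p.toList.length ∧ p.toList.length ≤ L0 := by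
    intro p hp hm
    have h1 : 1 ≤ p.toList.length := List.length_pos_of_ne_nil (hne p hp)
    have htake := (pv_startswith_iff w p).mp hm
    have h2 : p.toList.length ≤ w.toList.length := by
      conv_lhs => rw [htake]
      simp
    exact ⟨h1, by have := hmax p hp; omega⟩
  rcases pvBFind_spec P full i L0 with ⟨hb0, hnone⟩ | ⟨h1, h2, h3, h4⟩
  · -- no probe length works, so no prefix matches
    left
    refine ⟨hb0, ?_⟩
    rcases pvAFind_spec S w hs with ⟨ha, _⟩ | ⟨p, hpS, hpm, _, _⟩
    · exact ha
    · exfalso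
      have hpP := (hmem p).mp hpS
      rcases hlen_le p hpP hpm with ⟨hl1, hl2⟩
      have := hnone p.toList.length hl1 hl2
      rw [hcorr p hpP hpm] at this
      rw [(PySem.Set.contains_iff P p).mpr hpP] at this
      exact Bool.true_eq_false.mp this
  · -- B finds length Lr; A's first match has exactly that length
    right
    set Lr := pvBFind P full i L0 with hLr
    -- the probed slice is a matching prefix
    have hp0P : PySem.Str.slice full (some (i : Int)) (some ((i : Int) + (Lr : Nat))) ∈ P :=
      (PySem.Set.contains_iff P _).mp h3
    set p0 := PySem.Str.slice full (some (i : Int)) (some ((i : Int) + (Lr : Nat))) with hp0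
    have hp0list : p0.toList = w.toList.take Lr := by rw [hp0, pv_slice_toList, ← hw]
    have hp0len : p0.toList.length = Lr := by
      rw [hp0list, List.length_take]
      omega
    have hp0m : PySem.Str.startswith w p0 = true := by
      rw [pv_startswith_iff, hp0len]
      exact hp0list
    rcases pvAFind_spec S w hs with ⟨_, hno⟩ | ⟨p, hpS, hpm, hres, hmaxlen⟩
    · exfalso
      have hf := hno p0 ((hmem p0).mpr hp0P)
      rw [hp0m] at hf
      exact Bool.true_eq_false.mp hf
    · -- the first match p has length exactly Lr
      have hpP := (hmem p).mp hpS
      rcases hlen_le p hpP hpm with ⟨hl1, hl2⟩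
      have hple : p.toList.length ≤ Lr := by
        by_contra hgt
        have := h4 p.toList.length (by omega) hl2
        rw [hcorr p hpP hpm] at this
        rw [(PySem.Set.contains_iff P p).mpr hpP] at this
        exact Bool.true_eq_false.mp this
      have hpge : Lr ≤ p.toList.length := by
        have hmx := hmaxlen p0 ((hmem p0).mpr hp0P) hp0m
        simp only [PySem.Str.len_eq] at hmx
        have h' : p0.length ≤ p.length := by exact_mod_cast hmx
        have hq : p0.length = Lr := by simp at hp0len; exact hp0len
        have hpl : p.toList.length = p.length := by simp
        omega
      have hplen : p.toList.length = Lr := le_antisymm hple hpge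
      refine ⟨Lr, rfl, h1, by omega, PySem.Str.slice w (some (PySem.Str.len p)) none, hres, ?_⟩
      have : (PySem.Str.slice w (some (PySem.Str.len p)) none).toList = w.toList.drop Lr := by
        have hcast : PySem.Str.len p = ((p.toList.length : Nat) : Int) := by simp
        rw [hcast, hplen]
        simp [PySem.List.slice_from_natCast]
      rw [this, hw, List.drop_drop]

-- the loop invariant: both while-loops agree at every position
lemma pv_loop (S : List String) (P : PySem.Set String)
    (hmem : ∀ p, p ∈ S ↔ p ∈ P)
    (hs : S.Pairwise (fun a b => PySem.Str.len b ≤ PySem.Str.len a))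
    (hne : ∀ p ∈ P, p.toList ≠ [])
    (full : String) (maxlen : Nat)
    (hmax : ∀ p ∈ P, p.toList.length ≤ maxlen)
    (fuel : Nat) :
    ∀ (w : String) (i : Nat) (count : Int) (m : Bool),
      i ≤ full.toList.length → w.toList = full.toList.drop i →
      pvALoop S fuel w count m = pvBLoop P full full.toList.length maxlen fuel i count m := by
  induction fuel with
  | zero => intro w i c m _ _; rfl
  | succ fuel ih =>
    intro w i c m hi hw
    rcases pv_step S P hmem hs hne full w i maxlen hmax hi hw with
      ⟨hb, ha⟩ | ⟨L, hb, hL1, hL2, w', ha, hw'⟩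
    · simp only [pvALoop, pvBLoop, ha]
      rw [hb]
      simp
    · simp only [pvALoop, pvBLoop, ha, hb]
      rw [if_neg (by omega)]
      exact ih w' (i + L) (c + 1) true (by omega) hw'

-- ===== VERDICT (by name: the statement is the Claim_ definition above) =====
theorem greedy_prefix_count_spec : Claim_equal_greedy_prefix_count := by
  intro word pref_list _ hpre
  unfold Spec_greedy_prefix_count greedy_prefix_count greedy_prefix_count_alt
  have hmem : ∀ p, p ∈ PySem.List.sorted (PySem.Set.ofList pref_list) (fun p => PySem.Str.len p) true
      ↔ p ∈ (PySem.Set.ofList pref_list : PySem.Set String) :=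
    fun p => PySem.List.mem_sorted _ _ _ _
  have hne : ∀ p ∈ (PySem.Set.ofList pref_list : PySem.Set String), p.toList ≠ [] := by
    intro p hp hnil
    have hp' : p = "" := String.toList_inj.mp (by rw [hnil]; rfl)
    subst hp'
    exact hpre ((PySem.Set.mem_ofList _ _).mp hp)
  exact pv_loop _ _ hmem (PySem.List.sorted_pairwise_rev _ _) hne (PySem.Str.lower word) _
    (fun p hp => pv_maxlen_ge _ p hp) _ _ 0 0 false (Nat.zero_le _) (by rw [List.drop_zero])
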